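-- pv_equiv track=rewrite | github.com/Mangus001/1400- | 0.772.py | coprime_divisors
-- ===== SOURCE A (Python) =====
-- def coprime_divisors(q, p):
--     divisors = []
--     for d in range(1, q + 1):
--         if q % d == 0:
--             def gcd(a, b):
--                 while b:
--                     a, b = b, a % b
--                 return a
--             if gcd(d, p) == 1:
--                 divisors.append(d)
--     return divisors
-- ===== SOURCE B (Python) =====
-- def coprime_divisors(q, p):
--     # Trial division up to sqrt(q): each d with d*d <= q dividing q yields the
--     # pair (d, q//d); collect small halves ascending, large halves descending.
--     def euclid(a, b):
--         while b:
--             a, b = b, a % b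
--         return a
--     small = []
--     large = []
--     d = 1
--     while d * d <= q:
--         if q % d == 0:
--             if euclid(d, p) == 1:
--                 small.append(d)
--             e = q // d
--             if e != d and euclid(e, p) == 1:
--                 large.append(e)
--         d += 1
--     return small + large[::-1]
-- ===== Notes on version B (the rewrite author's own statement) =====
-- stated objective: faster
-- what changed: B enumerates divisors in pairs (d, q//d) by trial division only up to sqrt(q), keeping small halves ascending and large halves descending, instead of scanning every d from 1 to q.
import Mathlib
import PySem

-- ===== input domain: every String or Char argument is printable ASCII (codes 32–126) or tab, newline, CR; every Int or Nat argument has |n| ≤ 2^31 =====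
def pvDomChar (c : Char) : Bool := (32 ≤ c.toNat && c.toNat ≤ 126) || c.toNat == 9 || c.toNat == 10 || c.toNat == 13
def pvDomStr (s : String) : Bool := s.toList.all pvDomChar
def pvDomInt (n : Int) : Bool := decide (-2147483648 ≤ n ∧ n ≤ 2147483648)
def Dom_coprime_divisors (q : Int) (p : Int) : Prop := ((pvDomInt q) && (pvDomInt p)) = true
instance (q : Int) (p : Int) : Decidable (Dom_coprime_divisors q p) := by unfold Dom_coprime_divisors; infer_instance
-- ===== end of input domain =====

-- B replaces A's scan of every d in 1..q by trial division up to sqrt(q), collecting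
-- divisor pairs (d, q//d); objective: faster (asymptotically fewer divisibility tests).

-- Python's hand-written Euclid `while b: a, b = b, a % b` (floor mod), used verbatim by both programs
def pygcd (a b : Int) : Int :=
  if b = 0 then a else pygcd b (PySem.Int.mod a b)
termination_by b.natAbs
decreasing_by
  rcases lt_trichotomy b 0 with hb | hb | hb
  · have h1 := PySem.Int.mod_neg_bounds (a := a) hb
    omega
  · omega
  · have h1 := PySem.Int.mod_nonneg (a := a) hb
    have h2 := PySem.Int.mod_lt (a := a) hb
    omega

-- ===== PORT A =====
def coprime_divisors (q : Int) (p : Int) : List Int :=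
  (PySem.List.pyRange 1 (q + 1) 1).foldl
    (fun divisors d =>
      if PySem.Int.mod q d = 0 then
        if pygcd d p = 1 then divisors ++ [d] else divisors
      else divisors) []

-- ===== PORT B =====
-- the 'while d * d <= q' loop of Source B; small/large are the two accumulators
def cdGo (q p d : Int) (small large : List Int) : List Int :=
  if d * d ≤ q then
    if PySem.Int.mod q d = 0 then
      cdGo q p (d + 1)
        (if pygcd d p = 1 then small ++ [d] else small)
        (if PySem.Int.floordiv q d ≠ d ∧ pygcd (PySem.Int.floordiv q d) p = 1 then
          large ++ [PySem.Int.floordiv q d] else large)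
    else cdGo q p (d + 1) small large
  else small ++ large.reverse
termination_by (q + 1 - d).toNat
decreasing_by
  all_goals
    have hdq : d ≤ q := by nlinarith [mul_self_nonneg d, mul_self_nonneg (d - 1)]
    omega

def coprime_divisors_alt (q : Int) (p : Int) : List Int :=
  cdGo q p 1 [] []

-- ===== PRECONDITION & SPEC =====
def Spec_coprime_divisors (q : Int) (p : Int) (out : List Int) : Prop := out = coprime_divisors_alt q p
instance (q : Int) (p : Int) (out : List Int) : Decidable (Spec_coprime_divisors q p out) := by unfold Spec_coprime_divisors; infer_instance

-- ===== CLAIM (what is proved, stated in full; the proofs are below) =====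
def Claim_equal_coprime_divisors : Prop := ∀ (q : Int) (p : Int), Dom_coprime_divisors q p → Spec_coprime_divisors q p (coprime_divisors q p)

-- ===== LEMMAS AND PROOFS =====

-- A's loop is the filter of 1..q by "divides q and gcd 1"
lemma A_eq_filter (q p : Int) :
    coprime_divisors q p =
      (PySem.List.pyRange 1 (q + 1) 1).filter
        (fun d => decide (PySem.Int.mod q d = 0 ∧ pygcd d p = 1)) := by
  unfold coprime_divisors
  rw [PySem.List.foldl_congr_mem _ _
      (fun acc d => if (PySem.Int.mod q d = 0 ∧ pygcd d p = 1) then acc ++ [d] else acc) _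
      (by intro acc x _; beta_reduce; split_ifs <;> tauto)]
  rw [PySem.List.foldl_append_ite_eq_filter]
  simp

-- the residual work of B's loop from counter d on
def Rest (q p d x : Int) : Prop :=
  ∃ k, d ≤ k ∧ k * k ≤ q ∧ PySem.Int.mod q k = 0 ∧
    ((x = k ∧ pygcd k p = 1) ∨
     (x = PySem.Int.floordiv q k ∧ PySem.Int.floordiv q k ≠ k ∧ pygcd (PySem.Int.floordiv q k) p = 1))

lemma Rest_succ (q p d x : Int) :
    Rest q p d x ↔
      ((d * d ≤ q ∧ PySem.Int.mod q d = 0 ∧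
        ((x = d ∧ pygcd d p = 1) ∨
         (x = PySem.Int.floordiv q d ∧ PySem.Int.floordiv q d ≠ d ∧ pygcd (PySem.Int.floordiv q d) p = 1)))
       ∨ Rest q p (d + 1) x) := by
  constructor
  · rintro ⟨k, hk, h2, h3, h4⟩
    rcases eq_or_lt_of_le hk with rfl | h
    · exact Or.inl ⟨h2, h3, h4⟩
    · exact Or.inr ⟨k, by omega, h2, h3, h4⟩
  · rintro (⟨h1, h2, h3⟩ | ⟨k, hk, h2, h3, h4⟩)
    · exact ⟨d, le_refl d, h1, h2, h3⟩
    · exact ⟨k, by omega, h2, h3, h4⟩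

lemma mem_cdGo (q p x : Int) (d : Int) (small large : List Int) (hd : 1 ≤ d) :
    (x ∈ cdGo q p d small large ↔ x ∈ small ∨ x ∈ large ∨ Rest q p d x) := by
  have H : ∀ n : Nat, ∀ d : Int, ∀ small large : List Int, 1 ≤ d → (q + 1 - d).toNat = n →
      (x ∈ cdGo q p d small large ↔ x ∈ small ∨ x ∈ large ∨ Rest q p d x) := by
    intro n
    induction n using Nat.strong_induction_on with
    | _ n IH =>
      intro d small large hd hn
      rw [cdGo]
      by_cases h1 : d * d ≤ q
      · have hdq : d ≤ q := by nlinarith [mul_self_nonneg d, mul_self_nonneg (d - 1)]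
        by_cases h2 : PySem.Int.mod q d = 0
        · rw [if_pos h1, if_pos h2]
          rw [IH (q + 1 - (d + 1)).toNat (by omega) (d + 1) _ _ (by omega) rfl]
          rw [Rest_succ q p d x]
          split_ifs with ha hb <;>
            first
              | (simp only [List.mem_append, List.mem_singleton]; tauto)
              | tauto
        · rw [if_pos h1, if_neg h2]
          rw [IH (q + 1 - (d + 1)).toNat (by omega) (d + 1) _ _ (by omega) rfl]
          rw [Rest_succ q p d x]
          tauto
      · rw [if_neg h1]
        have hrest : ¬ Rest q p d x := by
          rintro ⟨k, hk, hkk, -⟩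
          have h3 : d * d ≤ k * k := by nlinarith
          omega
        simp only [List.mem_append, List.mem_reverse]
        tauto
  exact H (q + 1 - d).toNat d small large hd rfl

lemma pairing (q p x : Int) :
    Rest q p 1 x ↔ (1 ≤ x ∧ x ≤ q ∧ PySem.Int.mod q x = 0 ∧ pygcd x p = 1) := by
  constructor
  · rintro ⟨k, hk1, hkk, hmod, hcase⟩
    have hq1 : 1 ≤ q := by nlinarith [mul_pos (show (0:ℤ) < k by omega) (show (0:ℤ) < k by omega)]
    have hdvd : k ∣ q := (PySem.Int.mod_eq_zero_iff_dvd q k).mp hmod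
    have hfe : PySem.Int.floordiv q k = q / k := PySem.Int.floordiv_eq_ediv_of_pos (by omega)
    have hke : k * (q / k) = q := Int.mul_ediv_cancel' hdvd
    rcases hcase with ⟨rfl, hg⟩ | ⟨rfl, hne, hg⟩
    · refine ⟨hk1, ?_, hmod, hg⟩
      nlinarith [mul_le_mul_of_nonneg_left hk1 (show (0:ℤ) ≤ x by omega)]
    · rw [hfe] at *
      have he1 : 1 ≤ q / k := by nlinarith
      have hedvd : (q / k) ∣ q := Dvd.intro k (by linarith [hke])
      refine ⟨he1, ?_, (PySem.Int.mod_eq_zero_iff_dvd q (q / k)).mpr hedvd, hg⟩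
      nlinarith [mul_le_mul_of_nonneg_left hk1 (show (0:ℤ) ≤ q / k by omega)]
  · rintro ⟨hx1, hxq, hmod, hg⟩
    have hq1 : 1 ≤ q := by omega
    have hdvd : x ∣ q := (PySem.Int.mod_eq_zero_iff_dvd q x).mp hmod
    have hxe : x * (q / x) = q := Int.mul_ediv_cancel' hdvd
    by_cases hs : x * x ≤ q
    · exact ⟨x, hx1, hs, hmod, Or.inl ⟨rfl, hg⟩⟩
    · have hk1 : 1 ≤ q / x := by nlinarith
      have hkx : q / x < x := by
        by_contra h
        have h' := not_lt.mp h
        have : x * x ≤ x * (q / x) := mul_le_mul_of_nonneg_left h' (by omega)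
        omega
      have hkk : (q / x) * (q / x) ≤ q := by
        have h5 : (q / x) * (q / x) ≤ (q / x) * x :=
          mul_le_mul_of_nonneg_left (le_of_lt hkx) (by omega)
        nlinarith
      have hkdvd : (q / x) ∣ q := Dvd.intro x (by linarith [hxe])
      have hfe : PySem.Int.floordiv q (q / x) = q / (q / x) :=
        PySem.Int.floordiv_eq_ediv_of_pos (by omega)
      have hqk : q / (q / x) = x :=
        Int.ediv_eq_of_eq_mul_left (by omega) (by linarith [hxe])
      refine ⟨q / x, hk1, hkk, (PySem.Int.mod_eq_zero_iff_dvd q (q / x)).mpr hkdvd,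
        Or.inr ⟨by rw [hfe, hqk], by rw [hfe, hqk]; omega, by rw [hfe, hqk]; exact hg⟩⟩

lemma pairwise_cdGo (q p : Int) (d : Int) (small large : List Int) (hd : 1 ≤ d)
    (hs : small.Pairwise (· < ·)) (hsd : ∀ s ∈ small, s < d)
    (hl : large.Pairwise (· > ·))
    (hL : ∀ l ∈ large, ∃ k, 1 ≤ k ∧ k < d ∧ k * l = q ∧ k < l)
    (hsl : ∀ s ∈ small, ∀ l ∈ large, s < l) :
    (cdGo q p d small large).Pairwise (· < ·) := by
  have H : ∀ n : Nat, ∀ d : Int, ∀ small large : List Int, 1 ≤ d → (q + 1 - d).toNat = n →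
      small.Pairwise (· < ·) → (∀ s ∈ small, s < d) →
      large.Pairwise (· > ·) →
      (∀ l ∈ large, ∃ k, 1 ≤ k ∧ k < d ∧ k * l = q ∧ k < l) →
      (∀ s ∈ small, ∀ l ∈ large, s < l) →
      (cdGo q p d small large).Pairwise (· < ·) := by
    intro n
    induction n using Nat.strong_induction_on with
    | _ n IH =>
      intro d small large hd hn hs hsd hl hL hsl
      rw [cdGo]
      by_cases h1 : d * d ≤ q
      · have hdq : d ≤ q := by nlinarith [mul_self_nonneg d, mul_self_nonneg (d - 1)]
        by_cases h2 : PySem.Int.mod q d = 0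
        · rw [if_pos h1, if_pos h2]
          have hq1 : 1 ≤ q := by
            nlinarith [mul_pos (show (0:ℤ) < d by omega) (show (0:ℤ) < d by omega)]
          have hdvd : d ∣ q := (PySem.Int.mod_eq_zero_iff_dvd q d).mp h2
          have hfe : PySem.Int.floordiv q d = q / d := PySem.Int.floordiv_eq_ediv_of_pos (by omega)
          have hde : d * (q / d) = q := Int.mul_ediv_cancel' hdvd
          have he1 : 1 ≤ q / d := by nlinarith
          have hdle : d ≤ q / d :=
            le_of_mul_le_mul_left (by linarith [hde]) (show (0:ℤ) < d by omega)
          have hlarge_big : ∀ l ∈ large, d < l ∧ q / d < l := by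
            intro l hlm
            obtain ⟨k, hk1, hkd, hkl, hklt⟩ := hL l hlm
            have hl1 : 1 ≤ l := by nlinarith
            have p1 : k * l < d * l :=
              mul_lt_mul_of_pos_right (by omega) (by omega)
            constructor
            · by_contra h
              have p2 : d * l ≤ d * d := mul_le_mul_of_nonneg_left (not_lt.mp h) (by omega)
              omega
            · by_contra h
              have p2 : d * l ≤ d * (q / d) := mul_le_mul_of_nonneg_left (not_lt.mp h) (by omega)
              omega
          apply IH (q + 1 - (d + 1)).toNat (by omega) (d + 1) _ _ (by omega) rfl
          · -- new small list is still increasing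
            split_ifs with ha
            · rw [List.pairwise_append]
              refine ⟨hs, List.pairwise_singleton _ _, ?_⟩
              intro s hsm y hy
              rw [List.mem_singleton] at hy
              subst hy
              exact hsd s hsm
            · exact hs
          · -- new small elements stay below the new counter
            intro s hsm
            split_ifs at hsm with ha
            · rcases List.mem_append.mp hsm with h | h
              · have := hsd s h; omega
              · rw [List.mem_singleton] at h; omega
            · have := hsd s hsm; omega
          · -- new large list is still decreasing
            split_ifs with hb
            · rw [List.pairwise_append]
              refine ⟨hl, List.pairwise_singleton _ _, ?_⟩
              intro l hlm y hy
              rw [List.mem_singleton] at hy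
              subst hy
              rw [hfe]
              exact (hlarge_big l hlm).2
            · exact hl
          · -- the pair-origin invariant of the large list
            intro l hlm
            split_ifs at hlm with hb
            · rcases List.mem_append.mp hlm with h | h
              · obtain ⟨k, hk1, hkd, hkl, hklt⟩ := hL l h
                exact ⟨k, hk1, by omega, hkl, hklt⟩
              · rw [List.mem_singleton] at h
                subst h
                obtain ⟨hb1, -⟩ := hb
                rw [hfe] at hb1 ⊢
                exact ⟨d, by omega, by omega, hde, by omega⟩
            · obtain ⟨k, hk1, hkd, hkl, hklt⟩ := hL l hlm
              exact ⟨k, hk1, by omega, hkl, hklt⟩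
          · -- every small element is below every large element
            intro s hsm l hlm
            have hsm' : s ∈ small ∨ s = d := by
              split_ifs at hsm with ha
              · rcases List.mem_append.mp hsm with h | h
                · exact Or.inl h
                · exact Or.inr (List.mem_singleton.mp h)
              · exact Or.inl hsm
            have hlm' : l ∈ large ∨ (l = q / d ∧ q / d ≠ d) := by
              split_ifs at hlm with hb
              · rcases List.mem_append.mp hlm with h | h
                · exact Or.inl h
                · obtain ⟨hb1, -⟩ := hb
                  rw [hfe] at hb1
                  rw [List.mem_singleton] at h
                  rw [hfe] at h
                  exact Or.inr ⟨h, hb1⟩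
              · exact Or.inl hlm
            rcases hsm' with h | rfl <;> rcases hlm' with h' | ⟨rfl, hne⟩
            · exact hsl s h l h'
            · have := hsd s h; omega
            · exact (hlarge_big l h').1
            · omega
        · rw [if_pos h1, if_neg h2]
          refine IH (q + 1 - (d + 1)).toNat (by omega) (d + 1) _ _ (by omega) rfl hs
            (fun s h => by have := hsd s h; omega) hl
            (fun l h => ?_) hsl
          obtain ⟨k, hk1, hkd, hkl, hklt⟩ := hL l h
          exact ⟨k, hk1, by omega, hkl, hklt⟩
      · rw [if_neg h1]
        rw [List.pairwise_append]
        refine ⟨hs, ?_, ?_⟩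
        · rw [List.pairwise_reverse]
          exact hl
        · intro s hsm l hlm
          rw [List.mem_reverse] at hlm
          exact hsl s hsm l hlm
  exact H (q + 1 - d).toNat d small large hd rfl hs hsd hl hL hsl

-- ===== VERDICT (by name: the statement is the Claim_ definition above) =====
theorem coprime_divisors_spec : Claim_equal_coprime_divisors := by
  intro q p _
  unfold Spec_coprime_divisors coprime_divisors_alt
  have hmemA : ∀ x, x ∈ coprime_divisors q p ↔
      (1 ≤ x ∧ x ≤ q ∧ PySem.Int.mod q x = 0 ∧ pygcd x p = 1) := by
    intro x
    rw [A_eq_filter]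
    simp only [List.mem_filter, PySem.List.mem_pyRange_one, decide_eq_true_eq]
    constructor
    · rintro ⟨⟨h1, h2⟩, h3, h4⟩; exact ⟨h1, by omega, h3, h4⟩
    · rintro ⟨h1, h2, h3, h4⟩; exact ⟨⟨h1, by omega⟩, h3, h4⟩
  have hmemB : ∀ x, x ∈ cdGo q p 1 [] [] ↔
      (1 ≤ x ∧ x ≤ q ∧ PySem.Int.mod q x = 0 ∧ pygcd x p = 1) := by
    intro x
    rw [mem_cdGo q p x 1 [] [] (by omega)]
    simp only [List.not_mem_nil, false_or]
    exact pairing q p x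
  have hpwA : (coprime_divisors q p).Pairwise (· < ·) := by
    rw [A_eq_filter]
    exact (PySem.List.pairwise_lt_pyRange_one 1 (q + 1)).filter _
  have hpwB : (cdGo q p 1 [] []).Pairwise (· < ·) :=
    pairwise_cdGo q p 1 [] [] (by omega) (by simp) (by simp) (by simp) (by simp) (by simp)
  have hperm : (coprime_divisors q p).Perm (cdGo q p 1 [] []) := by
    refine (List.perm_ext_iff_of_nodup ?_ ?_).mpr ?_
    · exact hpwA.imp ne_of_lt
    · exact hpwB.imp ne_of_lt
    · intro x; rw [hmemA x, hmemB x]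
  exact List.Perm.eq_of_pairwise (fun a b _ _ h1 h2 => by omega) hpwA hpwB hperm
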